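-- pv_equiv track=rewrite | github.com/zxgsy520/PMGAP | scripts/swissprotproc.py | split_attr
-- ===== SOURCE A (Python) =====
-- import collections
--
-- def split_attr(attributes):
--
--     r = collections.OrderedDict()
--     contents = attributes.split()
--     desc = ""
--     temp = ""
--
--     for content in contents:
--         if "=" not in content:
--             if not temp:
--                 temp = content
--             else:
--                 temp += " %s" % content
--         else:
--             if "=" not in temp:
--                 desc = temp
--                 temp = content
--             else:
--                 tag, value = temp.split("=", 1)
--                 r[tag] = value
--                 temp = content
--
--     if "=" in temp:
--         tag, value = temp.split("=", 1)
--         r[tag] = value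
--
--     return r, desc
-- ===== SOURCE B (Python) =====
-- import collections
--
--
-- def split_attr(attributes):
--     # Phase 1: find the first token containing '='; everything before it is the
--     # description (desc stays "" when no token contains '=', matching A).
--     toks = attributes.split()
--     n = 0
--     while n < len(toks) and "=" not in toks[n]:
--         n += 1
--     if n == len(toks):
--         return collections.OrderedDict(), ""
--     desc = " ".join(toks[:n])
--     # Phase 2: group the remaining tokens; each '='-token opens a new group.
--     groups = []
--     for t in toks[n:]:
--         if "=" in t:
--             groups.append([t])
--         else:
--             groups[-1].append(t)
--     # Phase 3: each group joined by spaces is one 'tag=value' entry.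
--     r = collections.OrderedDict()
--     for g in groups:
--         tag, value = " ".join(g).split("=", 1)
--         r[tag] = value
--     return r, desc
-- ===== Notes on version B (the rewrite author's own statement) =====
-- stated objective: simpler
-- what changed: A's single-pass three-variable state machine (dict, desc, pending string buffer flushed on each '='-token) is replaced by a phased decomposition: locate the first '='-containing token, join the tokens before it as the description, group the remaining tokens by '='-tokens, and turn each joined group into one dict entry.
import Mathlib
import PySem

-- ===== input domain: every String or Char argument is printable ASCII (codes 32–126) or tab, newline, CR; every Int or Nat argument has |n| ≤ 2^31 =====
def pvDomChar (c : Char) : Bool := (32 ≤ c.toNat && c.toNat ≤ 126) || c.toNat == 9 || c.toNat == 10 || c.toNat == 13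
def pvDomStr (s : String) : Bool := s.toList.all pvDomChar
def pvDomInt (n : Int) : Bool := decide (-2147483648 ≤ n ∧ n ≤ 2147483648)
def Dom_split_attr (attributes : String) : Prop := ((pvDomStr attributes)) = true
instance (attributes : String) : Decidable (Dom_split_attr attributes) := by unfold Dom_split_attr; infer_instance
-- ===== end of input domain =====

-- B replaces A's streaming state machine by a phased decomposition (find first '='-token,
-- join leading description, group remaining tokens, parse each group); objective: simpler.


-- ===== PORT A =====
-- the body of A's for-loop: state = (r, desc, temp)
def aStep (st : PySem.Dict String String × String × String) (content : String) :
    PySem.Dict String String × String × String :=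
  let (r, desc, temp) := st
  if PySem.Str.isIn "=" content = false then
    if temp = "" then (r, desc, content) else (r, desc, temp ++ " " ++ content)
  else
    if PySem.Str.isIn "=" temp = false then (r, temp, content)
    else
      match PySem.Str.splitMax? temp "=" 1 with
      | some [tag, value] => (r.insert tag value, desc, content)
      | _ => (r, desc, content)   -- unreachable: '=' ∈ temp gives exactly two pieces

-- A's trailing flush and return
def aFlush (st : PySem.Dict String String × String × String) :
    (List (String × String)) × String :=
  let (r, desc, temp) := st
  if PySem.Str.isIn "=" temp then
    match PySem.Str.splitMax? temp "=" 1 with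
    | some [tag, value] => ((r.insert tag value).items, desc)
    | _ => (r.items, desc)        -- unreachable, as above
  else (r.items, desc)

def split_attr (attributes : String) : (List (String × String)) × String :=
  aFlush ((PySem.Str.split₀ attributes).foldl aStep (PySem.Dict.empty, "", ""))

-- ===== PORT B =====
-- the initial while-loop of B: tokens before the first '='-token, and the rest
def bSpan : List String → List String × List String
  | [] => ([], [])
  | t :: ts =>
    if PySem.Str.isIn "=" t then ([], t :: ts)
    else
      let p := bSpan ts
      (t :: p.1, p.2)

theorem bSpan_snd_length_le : ∀ l : List String, (bSpan l).2.length ≤ l.length := by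
  intro l
  induction l with
  | nil => simp [bSpan]
  | cons t ts ih =>
    by_cases h : PySem.Str.isIn "=" t
    · rw [bSpan, if_pos h]
    · rw [bSpan, if_neg h]
      simpa using Nat.le_succ_of_le ih

-- B's grouping loop: each '='-token opens a new group
def bGroups : List String → List (List String)
  | [] => []
  | t :: ts =>
    (t :: (bSpan ts).1) :: bGroups (bSpan ts).2
termination_by l => l.length
decreasing_by
  have := bSpan_snd_length_le ts
  simp only [List.length_cons]
  omega

-- B's dict-building loop body: one group becomes one entry
def insG (d : PySem.Dict String String) (g : List String) : PySem.Dict String String :=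
  match PySem.Str.splitMax? (PySem.Str.join " " g) "=" 1 with
  | some [tag, value] => d.insert tag value
  | _ => d                        -- unreachable: the group head contains '='

def split_attr_alt (attributes : String) : (List (String × String)) × String :=
  if (bSpan (PySem.Str.split₀ attributes)).2 = [] then ([], "")
  else
    (((bGroups (bSpan (PySem.Str.split₀ attributes)).2).foldl insG PySem.Dict.empty).items,
      PySem.Str.join " " (bSpan (PySem.Str.split₀ attributes)).1)

-- ===== PRECONDITION & SPEC =====
def Spec_split_attr (attributes : String) (out : (List (String × String)) × String) : Prop := out = split_attr_alt attributes
instance (attributes : String) (out : (List (String × String)) × String) : Decidable (Spec_split_attr attributes out) := by unfold Spec_split_attr; infer_instance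

-- ===== CLAIM (what is proved, stated in full; the proofs are below) =====
def Claim_equal_split_attr : Prop := ∀ (attributes : String), Dom_split_attr attributes → Spec_split_attr attributes (split_attr attributes)

-- ===== LEMMAS AND PROOFS =====

-- '=' is in a string iff the character '=' is among its characters
theorem isIn_eq_char (a : String) : PySem.Str.isIn "=" a = true ↔ '=' ∈ a.toList := by
  show PySem.Chars.isIn ['='] a.toList = true ↔ _
  rw [PySem.Chars.isIn_iff_infix]
  constructor
  · intro h; exact h.subset (by simp)
  · intro h
    obtain ⟨s, t, hst⟩ := List.append_of_mem h
    exact ⟨s, t, by rw [hst]; simp⟩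

theorem isIn_append (a b : String) :
    PySem.Str.isIn "=" (a ++ b) = (PySem.Str.isIn "=" a || PySem.Str.isIn "=" b) := by
  rcases h : (PySem.Str.isIn "=" a || PySem.Str.isIn "=" b) with _ | _
  · rcases Bool.or_eq_false_iff.mp h with ⟨ha, hb⟩
    rw [Bool.eq_false_iff]
    intro hab
    rcases (List.mem_append).mp (by simpa [String.toList_append] using (isIn_eq_char _).mp hab) with hm | hm
    · exact (Bool.eq_false_iff.mp ha) ((isIn_eq_char a).mpr hm)
    · exact (Bool.eq_false_iff.mp hb) ((isIn_eq_char b).mpr hm)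
  · rcases Bool.or_eq_true_iff.mp h with ha | hb
    · exact (isIn_eq_char _).mpr (by simp [String.toList_append, (isIn_eq_char a).mp ha])
    · exact (isIn_eq_char _).mpr (by simp [String.toList_append, (isIn_eq_char b).mp hb])

theorem ne_empty_of_isIn (a : String) (h : PySem.Str.isIn "=" a = true) : a ≠ "" := by
  intro h'; subst h'; exact absurd h (by decide)

-- Str.join " " over lists of tokens, via its char-level definition
theorem join_singleton (t : String) : PySem.Str.join " " [t] = t := by
  show String.ofList (PySem.Chars.join " ".toList ([t].map String.toList)) = t
  rw [List.map_singleton, PySem.Chars.join_singleton]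
  exact String.toList_inj.mp (by simp)

theorem join_cons_cons (a b : String) (l : List String) :
    PySem.Str.join " " (a :: b :: l) = a ++ " " ++ PySem.Str.join " " (b :: l) := by
  show String.ofList (PySem.Chars.join " ".toList ((a :: b :: l).map String.toList)) = _
  rw [List.map_cons, List.map_cons, PySem.Chars.join_cons_cons]
  apply String.toList_inj.mp
  simp [String.toList_append, PySem.Str.join]

theorem join_append_singleton (g : List String) (hg : g ≠ []) (t : String) :
    PySem.Str.join " " (g ++ [t]) = PySem.Str.join " " g ++ " " ++ t := by
  induction g with
  | nil => exact absurd rfl hg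
  | cons a g ih =>
    cases g with
    | nil =>
      show PySem.Str.join " " [a, t] = _
      rw [join_cons_cons, join_singleton, join_singleton]
    | cons b g' =>
      simp only [List.cons_append] at ih ⊢
      rw [join_cons_cons, ih (by simp), join_cons_cons]
      simp [String.append_assoc]

-- the fold A's phase-1 temp variable performs
def J (acc : String) (pre : List String) : String :=
  pre.foldl (fun a t => if a = "" then t else a ++ " " ++ t) acc

theorem J_eq_join_aux (pre : List String) : ∀ acc : String, acc ≠ "" →
    J acc pre = PySem.Str.join " " (acc :: pre) := by
  induction pre with
  | nil => intro acc _; rw [join_singleton]; rfl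
  | cons t pre ih =>
    intro acc hacc
    show J (if acc = "" then t else acc ++ " " ++ t) pre = _
    rw [if_neg hacc, join_cons_cons]
    cases pre with
    | nil =>
      show (acc ++ " " ++ t) = _
      rw [join_singleton]
    | cons u pre' =>
      rw [ih _ (by intro h; exact hacc (by simpa [String.append_eq_empty_iff] using h)),
        join_cons_cons, join_cons_cons]
      simp [String.append_assoc]

theorem J_eq_join (pre : List String) (h : ∀ t ∈ pre, t ≠ "") :
    J "" pre = PySem.Str.join " " pre := by
  cases pre with
  | nil => rfl
  | cons t pre' =>
    show J (if ("" : String) = "" then t else _) pre' = _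
    rw [if_pos rfl, J_eq_join_aux pre' t (h t (by simp))]

-- tokens produced by split() are never empty
theorem split₀go_ne_nil (s : List Char) : ∀ (cur : List Char) (acc : List (List Char)),
    (∀ p ∈ acc, p ≠ []) → ∀ p ∈ PySem.Chars.split₀.go s cur acc, p ≠ [] := by
  induction s with
  | nil =>
    intro cur acc hacc p hp
    by_cases hc : cur.isEmpty
    · rw [PySem.Chars.split₀.go, if_pos hc] at hp
      exact hacc p (by simpa using hp)
    · rw [PySem.Chars.split₀.go, if_neg hc] at hp
      rcases List.mem_cons.mp (List.mem_reverse.mp hp) with h | h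
      · subst h
        simp only [ne_eq, List.reverse_eq_nil_iff]
        simpa [List.isEmpty_iff] using hc
      · exact hacc p h
  | cons c rest ih =>
    intro cur acc hacc p hp
    by_cases hs : PySem.Chars.isspace c
    · by_cases hc : cur.isEmpty
      · rw [PySem.Chars.split₀.go, if_pos hs, if_pos hc] at hp
        exact ih [] acc hacc p hp
      · rw [PySem.Chars.split₀.go, if_pos hs, if_neg hc] at hp
        refine ih [] (cur.reverse :: acc) ?_ p hp
        intro q hq
        rcases List.mem_cons.mp hq with h | h
        · subst h
          simp only [ne_eq, List.reverse_eq_nil_iff]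
          simpa [List.isEmpty_iff] using hc
        · exact hacc q h
    · rw [PySem.Chars.split₀.go, if_neg hs] at hp
      exact ih (c :: cur) acc hacc p hp

theorem split₀_ne_empty (s : String) : ∀ t ∈ PySem.Str.split₀ s, t ≠ "" := by
  intro t ht
  obtain ⟨p, hp, rfl⟩ := List.mem_map.mp ht
  have hne : p ≠ [] := split₀go_ne_nil s.toList [] [] (by simp) p hp
  intro h
  exact hne (by simpa using congrArg String.toList h)

-- projections of bSpan and the bGroups equations
theorem bSpan_fst_pos (t : String) (ts : List String) (h : PySem.Str.isIn "=" t = true) :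
    (bSpan (t :: ts)).1 = [] := by
  rw [bSpan, if_pos h]

theorem bSpan_snd_pos (t : String) (ts : List String) (h : PySem.Str.isIn "=" t = true) :
    (bSpan (t :: ts)).2 = t :: ts := by
  rw [bSpan, if_pos h]

theorem bSpan_fst_neg (t : String) (ts : List String) (h : PySem.Str.isIn "=" t = false) :
    (bSpan (t :: ts)).1 = t :: (bSpan ts).1 := by
  rw [bSpan, if_neg (by rw [h]; simp)]

theorem bSpan_snd_neg (t : String) (ts : List String) (h : PySem.Str.isIn "=" t = false) :
    (bSpan (t :: ts)).2 = (bSpan ts).2 := by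
  rw [bSpan, if_neg (by rw [h]; simp)]

theorem bGroups_nil : bGroups [] = [] := by
  rw [bGroups]

theorem bGroups_cons (t : String) (ts : List String) :
    bGroups (t :: ts) = (t :: (bSpan ts).1) :: bGroups (bSpan ts).2 := by
  rw [bGroups]

-- branch-selection helpers for A's loop body
theorem aStep_plain (r : PySem.Dict String String) (desc temp t : String)
    (ht : PySem.Str.isIn "=" t = false) (htemp : temp ≠ "") :
    aStep (r, desc, temp) t = (r, desc, temp ++ " " ++ t) := by
  rw [aStep, if_pos ht, if_neg htemp]

theorem aStep_desc (r : PySem.Dict String String) (desc temp t : String)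
    (ht : PySem.Str.isIn "=" t = false) :
    aStep (r, desc, temp) t = (r, desc, if temp = "" then t else temp ++ " " ++ t) := by
  rw [aStep, if_pos ht]
  split_ifs <;> rfl

theorem aStep_first (r : PySem.Dict String String) (desc temp t : String)
    (ht : PySem.Str.isIn "=" t = true) (htemp : PySem.Str.isIn "=" temp = false) :
    aStep (r, desc, temp) t = (r, temp, t) := by
  rw [aStep, if_neg (by rw [ht]; simp), if_pos htemp]

theorem aStep_flush (r : PySem.Dict String String) (desc t : String) (g : List String)
    (ht : PySem.Str.isIn "=" t = true)
    (htemp : PySem.Str.isIn "=" (PySem.Str.join " " g) = true) :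
    aStep (r, desc, PySem.Str.join " " g) t = (insG r g, desc, t) := by
  rw [aStep, if_neg (by rw [ht]; simp), if_neg (by rw [htemp]; simp), insG]
  cases h : PySem.Str.splitMax? (PySem.Str.join " " g) "=" 1 with
  | none => rfl
  | some l => rcases l with _ | ⟨a, _ | ⟨b, _ | _⟩⟩ <;> rfl

theorem aFlush_eq_insG (r : PySem.Dict String String) (desc : String) (g : List String)
    (htemp : PySem.Str.isIn "=" (PySem.Str.join " " g) = true) :
    aFlush (r, desc, PySem.Str.join " " g) = ((insG r g).items, desc) := by
  rw [aFlush, if_pos htemp, insG]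
  cases h : PySem.Str.splitMax? (PySem.Str.join " " g) "=" 1 with
  | none => rfl
  | some l => rcases l with _ | ⟨a, _ | ⟨b, _ | _⟩⟩ <;> rfl

-- phase 2: once the first '='-token has been seen, A's temp is the space-join of the
-- currently open group, and flushes line up with B's grouping
theorem phase2 (rest : List String) :
    ∀ (r : PySem.Dict String String) (desc : String) (g : List String), g ≠ [] →
      PySem.Str.isIn "=" (PySem.Str.join " " g) = true →
      aFlush (rest.foldl aStep (r, desc, PySem.Str.join " " g)) =
        ((((g ++ (bSpan rest).1) :: bGroups (bSpan rest).2).foldl insG r).items, desc) := by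
  induction rest with
  | nil =>
    intro r desc g hg hin
    rw [List.foldl_nil, aFlush_eq_insG r desc g hin]
    simp [bSpan, bGroups_nil]
  | cons t ts ih =>
    intro r desc g hg hin
    rw [List.foldl_cons]
    by_cases hP : PySem.Str.isIn "=" t
    · -- '='-token: A flushes the open group, B closes it
      have hih := ih (insG r g) desc [t] (by simp) (by rwa [join_singleton])
      rw [join_singleton] at hih
      rw [aStep_flush r desc t g hP hin, hih, bSpan_fst_pos t ts hP, bSpan_snd_pos t ts hP,
        List.append_nil, bGroups_cons]
      simp only [List.singleton_append, List.foldl_cons]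
    · -- plain token: appended to the open group on both sides
      simp only [Bool.not_eq_true] at hP
      rw [aStep_plain r desc _ t hP (ne_empty_of_isIn _ hin),
        ← join_append_singleton g hg t,
        ih r desc (g ++ [t]) (by simp)
          (by rw [join_append_singleton g hg t, isIn_append, isIn_append, hin]; rfl),
        bSpan_fst_neg t ts hP, bSpan_snd_neg t ts hP]
      simp [List.append_assoc]

-- phase 1: before any '='-token, A only accumulates the description buffer
theorem phase1 (toks : List String) :
    ∀ acc : String, PySem.Str.isIn "=" acc = false →
      aFlush (toks.foldl aStep (PySem.Dict.empty, "", acc)) =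
        (if (bSpan toks).2 = [] then ([], "")
         else (((bGroups (bSpan toks).2).foldl insG PySem.Dict.empty).items,
               J acc (bSpan toks).1)) := by
  induction toks with
  | nil =>
    intro acc hacc
    rw [List.foldl_nil, aFlush, if_neg (by rw [hacc]; simp)]
    simp [bSpan]
    rfl
  | cons t ts ih =>
    intro acc hacc
    rw [List.foldl_cons]
    by_cases hP : PySem.Str.isIn "=" t
    · -- first '='-token: desc is fixed to acc, phase 2 begins with group [t]
      have hih := phase2 ts PySem.Dict.empty acc [t] (by simp) (by rwa [join_singleton])
      rw [join_singleton] at hih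
      rw [aStep_first PySem.Dict.empty "" acc t hP hacc, hih, bSpan_fst_pos t ts hP,
        bSpan_snd_pos t ts hP, if_neg (by simp), bGroups_cons, List.foldl_cons]
      simp only [List.singleton_append, List.foldl_cons]
      rfl
    · -- plain token: goes into the description buffer
      simp only [Bool.not_eq_true] at hP
      have hacc' : PySem.Str.isIn "=" (if acc = "" then t else acc ++ " " ++ t) = false := by
        split_ifs
        · exact hP
        · rw [isIn_append, isIn_append, hacc, hP]; rfl
      rw [aStep_desc PySem.Dict.empty "" acc t hP, ih _ hacc',
        bSpan_fst_neg t ts hP, bSpan_snd_neg t ts hP]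
      by_cases h2 : (bSpan ts).2 = []
      · rw [if_pos h2, if_pos h2]
      · rw [if_neg h2, if_neg h2]
        rfl

-- ===== VERDICT (by name: the statement is the Claim_ definition above) =====
theorem split_attr_spec : Claim_equal_split_attr := by
  intro attributes _
  unfold Spec_split_attr split_attr split_attr_alt
  rw [phase1 (PySem.Str.split₀ attributes) "" (by decide)]
  by_cases hsp : (bSpan (PySem.Str.split₀ attributes)).2 = []
  · rw [if_pos hsp, if_pos hsp]
  · have hmem : ∀ l : List String, ∀ u ∈ (bSpan l).1, u ∈ l := by
      intro l
      induction l with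
      | nil => simp [bSpan]
      | cons a l' ih =>
        intro u hu
        by_cases h : PySem.Str.isIn "=" a
        · rw [bSpan_fst_pos a l' h] at hu
          exact absurd hu (List.not_mem_nil)
        · simp only [Bool.not_eq_true] at h
          rw [bSpan_fst_neg a l' h] at hu
          rcases List.mem_cons.mp hu with h' | h'
          · simp [h']
          · exact List.mem_cons_of_mem a (ih u h')
    have hpre : ∀ u ∈ (bSpan (PySem.Str.split₀ attributes)).1, u ≠ "" :=
      fun u hu => split₀_ne_empty attributes u (hmem _ u hu)
    rw [if_neg hsp, if_neg hsp, J_eq_join _ hpre]
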